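-- pv_equiv track=rewrite | github.com/joshua23tech/katas | foldList.py | fold_list
-- ===== SOURCE A (Python) =====
-- def fold_list(list_to_fold, fold_count):
--     int_lst_len = len(list_to_fold)
--
--     if fold_count == 1:
--         if int_lst_len % 2 == 0:
--             int_counter = 0
--             int_lst_len_halved = int_lst_len / 2
--             lst_response = []
--             while int_counter < int_lst_len_halved:
--                 int_outcome = list_to_fold[int_counter] + list_to_fold[(int_lst_len - 1)-int_counter]
--                 lst_response.append(int_outcome)
--                 int_counter += 1
--             return lst_response
--         else:
--             int_middle_index = int((((int_lst_len + 1) + 1) / 2) - 1)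
--             int_val_at_middle_index = list_to_fold[int_middle_index]
--
--             del list_to_fold[int_middle_index]
--
--             int_counter = 0
--             int_lst_len_ii = len(list_to_fold)
--             int_lst_len_halved = int_lst_len_ii / 2
--             lst_response = []
--             while int_counter < int_lst_len_halved:
--                 int_outcome = list_to_fold[int_counter] + list_to_fold[(int_lst_len_ii - 1) - int_counter]
--                 lst_response.append(int_outcome)
--                 int_counter += 1
--             lst_response.append(int_val_at_middle_index)
--             return lst_response
--     else:
--         if int_lst_len % 2 == 0:
--             int_counter = 0
--             int_lst_len_halved = int_lst_len / 2
--             lst_response = []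
--             while int_counter < int_lst_len_halved:
--                 int_outcome = list_to_fold[int_counter] + list_to_fold[(int_lst_len - 1)-int_counter]
--                 lst_response.append(int_outcome)
--                 int_counter += 1
--             return fold_list(lst_response, fold_count - 1)
--         else:
--             int_middle_index = int((((int_lst_len + 1) + 1) / 2) - 1)
--             int_val_at_middle_index = list_to_fold[int_middle_index]
--
--             del list_to_fold[int_middle_index]
--
--             int_counter = 0
--             int_lst_len_ii = len(list_to_fold)
--             int_lst_len_halved = int_lst_len_ii / 2
--             lst_response = []
--             while int_counter < int_lst_len_halved:
--                 int_outcome = list_to_fold[int_counter] + list_to_fold[(int_lst_len_ii - 1) - int_counter]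
--                 lst_response.append(int_outcome)
--                 int_counter += 1
--             lst_response.append(int_val_at_middle_index)
--             return fold_list(lst_response, fold_count - 1)
-- ===== SOURCE B (Python) =====
-- def _fold_once(a):
--     n = len(a)
--     folded = [x + y for x, y in zip(a, reversed(a))][:n // 2]
--     if n % 2:
--         folded.append(a[n // 2])
--     return folded
--
--
-- def fold_list(list_to_fold, fold_count):
--     cur = list_to_fold
--     for _ in range(fold_count):
--         cur = _fold_once(cur)
--     return cur
-- ===== Notes on version B (the rewrite author's own statement) =====
-- stated objective: simpler
-- what changed: Replaced the recursive four-branch version (with in-place middle deletion and hand-written index loops) by an iterative loop over range(fold_count) around one small helper that pairs the list with its reverse via zip and appends the middle element when the length is odd; note A mutates odd-length argument lists in place, B does not (equivalence is about the return value).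
import Mathlib
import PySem

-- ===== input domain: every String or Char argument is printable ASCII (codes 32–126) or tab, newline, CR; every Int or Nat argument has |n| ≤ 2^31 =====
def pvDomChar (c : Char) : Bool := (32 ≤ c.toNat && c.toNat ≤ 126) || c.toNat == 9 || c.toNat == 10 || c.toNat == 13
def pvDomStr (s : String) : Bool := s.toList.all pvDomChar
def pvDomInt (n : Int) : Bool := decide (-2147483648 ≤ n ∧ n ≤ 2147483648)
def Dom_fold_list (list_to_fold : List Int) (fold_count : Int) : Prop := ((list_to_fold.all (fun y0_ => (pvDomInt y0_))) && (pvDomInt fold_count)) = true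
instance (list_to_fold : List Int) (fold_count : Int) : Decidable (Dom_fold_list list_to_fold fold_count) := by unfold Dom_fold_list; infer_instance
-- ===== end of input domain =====

-- B replaces A's recursion + in-place middle deletion + hand index loops by an iterative loop
-- around a zip-with-reverse helper; return-value equivalence only (A mutates odd-length arguments in place, B does not).

-- ===== PORT A =====
-- A's while loop 'while counter < len/2: append a[counter] + a[(len-1)-counter]' ; all indices are
-- in range, so List.getD is exact here (Python never raises in this loop).
def pvPairLoopA (a : List Int) : List Int :=
  (List.range (a.length / 2)).map
    (fun i => a.getD i 0 + a.getD (a.length - 1 - i) 0)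

def fold_list (list_to_fold : List Int) (fold_count : Int) : List Int :=
  let n := list_to_fold.length
  if fold_count = 1 then
    if n % 2 = 0 then
      pvPairLoopA list_to_fold
    else
      -- int_middle_index = int(((n+1)+1)/2 - 1); for odd n this equals (n-1)/2 = n/2
      let mid := (n + 2) / 2 - 1
      let mv := list_to_fold.getD mid 0
      let b := list_to_fold.eraseIdx mid        -- del list_to_fold[mid]
      pvPairLoopA b ++ [mv]
  else if fold_count ≤ 0 then
    []  -- totality guard: Python recurses forever here (RecursionError); excluded by Pre_
  else
    if n % 2 = 0 then
      fold_list (pvPairLoopA list_to_fold) (fold_count - 1)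
    else
      let mid := (n + 2) / 2 - 1
      let mv := list_to_fold.getD mid 0
      let b := list_to_fold.eraseIdx mid
      fold_list (pvPairLoopA b ++ [mv]) (fold_count - 1)
termination_by fold_count.toNat
decreasing_by all_goals omega

-- ===== PORT B =====
-- [x + y for x, y in zip(a, reversed(a))][:n//2]  (+ middle element if n odd)
def pvFoldOnceB (a : List Int) : List Int :=
  let n := a.length
  let folded := (List.zipWith (· + ·) a a.reverse).take (n / 2)
  if n % 2 = 1 then folded ++ [a.getD (n / 2) 0] else folded

def fold_list_alt (list_to_fold : List Int) (fold_count : Int) : List Int :=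
  (List.range fold_count.toNat).foldl (fun cur _ => pvFoldOnceB cur) list_to_fold

-- ===== PRECONDITION & SPEC =====
-- Pre_ excludes only fold_count ≤ 0, where Python A recurses forever (RecursionError; for very
-- large positive counts CPython's recursion limit may also fire — an environmental limit, not modelled).
def Pre_fold_list (list_to_fold : List Int) (fold_count : Int) : Prop := 1 ≤ fold_count
instance (list_to_fold : List Int) (fold_count : Int) : Decidable (Pre_fold_list list_to_fold fold_count) := by unfold Pre_fold_list; infer_instance
def pvWitness_fold_list : List Int × Int := ([1, 2, 3, 4, 5], 2)

def Spec_fold_list (list_to_fold : List Int) (fold_count : Int) (out : List Int) : Prop := out = fold_list_alt list_to_fold fold_count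
instance (list_to_fold : List Int) (fold_count : Int) (out : List Int) : Decidable (Spec_fold_list list_to_fold fold_count out) := by unfold Spec_fold_list; infer_instance

-- ===== CLAIM (what is proved, stated in full; the proofs are below) =====
def Claim_equal_fold_list : Prop := ∀ (list_to_fold : List Int) (fold_count : Int), Dom_fold_list list_to_fold fold_count → Pre_fold_list list_to_fold fold_count → Spec_fold_list list_to_fold fold_count (fold_list list_to_fold fold_count)

-- ===== LEMMAS AND PROOFS =====

lemma take_zip_eq (a : List Int) :
    (List.zipWith (· + ·) a a.reverse).take (a.length / 2) =
      (List.range (a.length / 2)).map (fun i => a.getD i 0 + a.getD (a.length - 1 - i) 0) := by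
  apply List.ext_getElem
  · simp; omega
  · intro i h1 h2
    have hi : i < a.length / 2 := by simp at h1; omega
    have hn : i < a.length := by omega
    have hn2 : a.length - 1 - i < a.length := by omega
    simp [List.getD_eq_getElem?_getD, List.getElem?_eq_getElem hn, List.getElem?_eq_getElem hn2,
      List.getElem_reverse]

lemma erase_loop_eq (a : List Int) (hodd : a.length % 2 = 1) :
    pvPairLoopA (a.eraseIdx (a.length / 2)) =
      (List.zipWith (· + ·) a a.reverse).take (a.length / 2) := by
  have hpos : 0 < a.length := by omega
  have hlen : (a.eraseIdx (a.length / 2)).length = a.length - 1 := by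
    rw [List.length_eraseIdx_of_lt]; omega
  apply List.ext_getElem
  · simp [pvPairLoopA, hlen]; omega
  · intro i h1 h2
    have hi : i < a.length / 2 := by simp at h2; omega
    have hn : i < a.length := by omega
    have h3 : a.length - 1 - i < a.length := by omega
    have h4 : (a.eraseIdx (a.length / 2)).length - 1 - i = a.length - 2 - i := by omega
    simp only [pvPairLoopA, List.getElem_map, List.getElem_range, h4]
    have e1 : (a.eraseIdx (a.length / 2)).getD i 0 = a[i] := by
      rw [List.getD_eq_getElem _ _ (by omega), List.getElem_eraseIdx_of_lt _ hi]
    have e2 : (a.eraseIdx (a.length / 2)).getD (a.length - 2 - i) 0 = a[a.length - 1 - i] := by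
      rw [List.getD_eq_getElem _ _ (by omega)]
      rw [List.getElem_eraseIdx_of_ge _ (by omega)]
      congr 1; omega
    rw [e1, e2]
    simp [List.getElem_reverse, List.getElem_zipWith]

lemma pvFoldOnce_eq (a : List Int) : pvFoldOnceB a = (if a.length % 2 = 0 then pvPairLoopA a else pvPairLoopA (a.eraseIdx ((a.length + 2) / 2 - 1)) ++ [a.getD ((a.length + 2) / 2 - 1) 0]) := by
  unfold pvFoldOnceB
  by_cases h : a.length % 2 = 1
  · have hmid : (a.length + 2) / 2 - 1 = a.length / 2 := by omega
    simp [h, erase_loop_eq a h]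
  · have h0 : a.length % 2 = 0 := by omega
    simp [h0, take_zip_eq, pvPairLoopA]

lemma fold_list_eq_iter_nat : ∀ (n : Nat) (l : List Int) (c : Int), c.toNat = n + 1 →
    fold_list l c = pvFoldOnceB^[n + 1] l := by
  intro n
  induction n with
  | zero =>
    intro l c h
    have hc : c = 1 := by omega
    subst hc
    rw [fold_list]
    simp [pvFoldOnce_eq l]
  | succ m ih =>
    intro l c h
    have h1 : ¬ c = 1 := by omega
    have h2 : ¬ c ≤ 0 := by omega
    rw [fold_list]
    simp only [h1, h2, if_false]
    have hnext : (c - 1).toNat = m + 1 := by omega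
    have hiter : pvFoldOnceB^[m + 1 + 1] l = pvFoldOnceB^[m + 1] (pvFoldOnceB l) := by
      rw [Function.iterate_succ_apply]
    rw [hiter, ← ih (pvFoldOnceB l) (c - 1) hnext]
    by_cases hp : l.length % 2 = 0
    · simp [hp, pvFoldOnce_eq l]
    · simp [hp, pvFoldOnce_eq l]

lemma fold_list_eq_iter (l : List Int) (c : Int) (hc : 1 ≤ c) :
    fold_list l c = pvFoldOnceB^[c.toNat] l := by
  have h : c.toNat = (c.toNat - 1) + 1 := by omega
  rw [h]
  exact fold_list_eq_iter_nat (c.toNat - 1) l c h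

lemma foldl_range_iterate : ∀ (n : Nat) (l : List Int),
    (List.range n).foldl (fun cur _ => pvFoldOnceB cur) l = pvFoldOnceB^[n] l := by
  intro n
  induction n with
  | zero => intro l; simp
  | succ m ih =>
    intro l
    rw [List.range_succ, List.foldl_append, ih, Function.iterate_succ_apply']
    simp

lemma alt_eq_iter (l : List Int) (c : Int) :
    fold_list_alt l c = pvFoldOnceB^[c.toNat] l := by
  unfold fold_list_alt
  exact foldl_range_iterate c.toNat l

-- ===== VERDICT (by name: the statement is the Claim_ definition above) =====
theorem fold_list_spec : Claim_equal_fold_list := by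
  intro l c _ hc
  unfold Spec_fold_list
  rw [fold_list_eq_iter l c hc, alt_eq_iter]
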